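-- pv_equiv track=rewrite | github.com/Aasthaengg/IBMdataset | Python_codes/p02851/s648777084.py | solve
-- ===== SOURCE A (Python) =====
-- def solve(N, K, A):
--     if K == 1:
--         return 0
--
--     S = [0 for _ in range(N+1)]
--     for i in range(N):
--         S[i+1] = S[i] + A[i]
--
--     count_sum = 0
--     count = dict()
--     for j in range(1, N+1):
--         j_mod_k = (S[j] - j) % K  # 0 <= jmodk < K
--         if j == 1:
--             for i in range(max(0, j-K+1), j):
--                 # (S[i] - i) % K の値 i_mod_k は、次のループでもほぼ重複する
--                 # i = max(0, j-K+1) の時の i_mod_k は、i+1で破棄する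
--                 # i = j の時の i_mod_k は、i+1で生成する
--                 i_mod_k = (S[i] - i) % K
--                 if i_mod_k in count:
--                     count[i_mod_k] += 1
--                 else:
--                     count[i_mod_k] = 1
--         else:
--             if max(0, j-K+1) != max(0, (j-1)-K+1):
--                 i = max(0, (j-1)-K+1)
--                 i_mod_k = (S[i] - i) % K
--                 if i_mod_k in count:
--                     if count[i_mod_k] == 1:
--                         count.pop(i_mod_k)
--                     else:
--                         count[i_mod_k] -= 1
--             i = j-1
--             i_mod_k = (S[i] - i) % K
--             if i_mod_k in count:
--                 count[i_mod_k] += 1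
--             else:
--                 count[i_mod_k] = 1
--         if j_mod_k in count:
--             count_sum += count[j_mod_k]
--     return count_sum
-- ===== SOURCE B (Python) =====
-- def solve(N, K, A):
--     if K < 2 or N <= 0:
--         return 0
--     S = [0] * (N + 1)
--     for i in range(N):
--         S[i + 1] = S[i] + A[i]
--     r = [(S[i] - i) % K for i in range(N + 1)]
--     occ = {}
--     for i in range(N + 1):
--         occ.setdefault(r[i], []).append(i)
--     total = 0
--     for j in range(1, N + 1):
--         g = occ[r[j]]
--         total += _bisect_left(g, j) - _bisect_left(g, max(0, j - K + 1))
--     return total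
--
--
-- def _bisect_left(g, v):
--     lo, hi = 0, len(g)
--     while lo < hi:
--         mid = (lo + hi) // 2
--         if g[mid] < v:
--             lo = mid + 1
--         else:
--             hi = mid
--     return lo
-- ===== Notes on version B (the rewrite author's own statement) =====
-- stated objective: alternative
-- what changed: Replaces A's incrementally maintained sliding-window residue counter (dict with add/evict per step) by grouping all residue-equal prefix indices once and, for each j, counting the indices inside the window [max(0,j-K+1), j) by two binary searches in j's residue group.
import Mathlib
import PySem

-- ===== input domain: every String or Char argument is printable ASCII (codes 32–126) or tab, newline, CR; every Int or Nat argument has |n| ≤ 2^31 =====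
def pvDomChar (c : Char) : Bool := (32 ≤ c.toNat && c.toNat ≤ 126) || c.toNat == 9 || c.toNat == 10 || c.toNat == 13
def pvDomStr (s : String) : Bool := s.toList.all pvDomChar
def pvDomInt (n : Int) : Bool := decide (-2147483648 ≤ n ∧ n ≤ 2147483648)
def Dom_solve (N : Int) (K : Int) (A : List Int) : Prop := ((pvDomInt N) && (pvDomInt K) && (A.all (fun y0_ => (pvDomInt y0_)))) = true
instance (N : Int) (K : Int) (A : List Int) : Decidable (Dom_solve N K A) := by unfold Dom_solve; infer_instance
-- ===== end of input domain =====

-- B replaces A's incrementally maintained sliding-window residue counter by a one-pass grouping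
-- of residue-equal prefix indices plus two binary searches per j (objective: alternative algorithm).

-- ===== PORT A =====
-- shared prologue of both Pythons: S = [0]*(N+1); for i in range(N): S[i+1] = S[i] + A[i]
def buildS (N : Int) (A : List Int) : List Int :=
  (PySem.List.pyRange 0 N 1).foldl
    (fun S i => PySem.List.pySetD S (i + 1) (PySem.List.pyGetD S i 0 + PySem.List.pyGetD A i 0))
    ((PySem.List.pyRange 0 (N + 1) 1).map (fun _ => 0))

-- A's 'if i_mod_k in count: count[i_mod_k] += 1 else: count[i_mod_k] = 1'
def dictIncr (c : PySem.Dict Int Int) (x : Int) : PySem.Dict Int Int :=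
  match c.get? x with
  | some v => c.insert x (v + 1)
  | none => c.insert x 1

-- A's 'if i_mod_k in count: (pop if count[i_mod_k] == 1 else decrement)'
def dictDecr (c : PySem.Dict Int Int) (x : Int) : PySem.Dict Int Int :=
  match c.get? x with
  | some v => if v = 1 then c.erase x else c.insert x (v - 1)
  | none => c

-- the body of A's 'for j in range(1, N+1)' loop, as a fold step over the state (count_sum, count)
def solveStep (K : Int) (S : List Int) (st : Int × PySem.Dict Int Int) (j : Int) :
    Int × PySem.Dict Int Int :=
  let jmk := PySem.Int.mod (PySem.List.pyGetD S j 0 - j) K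
  let count :=
    if j = 1 then
      (PySem.List.pyRange (max 0 (j - K + 1)) j 1).foldl
        (fun c i => dictIncr c (PySem.Int.mod (PySem.List.pyGetD S i 0 - i) K)) st.2
    else
      let c1 :=
        if max 0 (j - K + 1) ≠ max 0 (j - 1 - K + 1) then
          dictDecr st.2
            (PySem.Int.mod
              (PySem.List.pyGetD S (max 0 (j - 1 - K + 1)) 0 - max 0 (j - 1 - K + 1)) K)
        else st.2
      dictIncr c1 (PySem.Int.mod (PySem.List.pyGetD S (j - 1) 0 - (j - 1)) K)
  match count.get? jmk with
  | some v => (st.1 + v, count)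
  | none => (st.1, count)

def solve (N : Int) (K : Int) (A : List Int) : Int :=
  if K = 1 then 0
  else
    let S := buildS N A
    ((PySem.List.pyRange 1 (N + 1) 1).foldl (solveStep K S) (0, PySem.Dict.empty)).1

-- ===== PORT B =====
-- Source B's hand-written _bisect_left loop; lo/hi are Python ints that stay in [0, len g], so Nat
-- is exact; the while loop is ported with a fuel that bounds its iteration count (hi - lo shrinks
-- every pass, so fuel = len g never runs out and the guard 'lo < hi' alone decides termination)
def bisectGo (g : List Int) (v : Int) : Nat → Nat → Nat → Nat
  | 0, lo, _hi => lo
  | fuel + 1, lo, hi =>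
    if lo < hi then
      let mid := (lo + hi) / 2          -- (lo+hi)//2 on nonnegative ints
      if PySem.List.pyGetD g (mid : Int) 0 < v then bisectGo g v fuel (mid + 1) hi
      else bisectGo g v fuel lo mid
    else lo

def bisectLeft (g : List Int) (v : Int) : Nat := bisectGo g v g.length 0 g.length

def solve_alt (N : Int) (K : Int) (A : List Int) : Int :=
  if K < 2 ∨ N ≤ 0 then 0
  else
    let S := buildS N A
    let r := (PySem.List.pyRange 0 (N + 1) 1).map
      (fun i => PySem.Int.mod (PySem.List.pyGetD S i 0 - i) K)
    let occ := (PySem.List.pyRange 0 (N + 1) 1).foldl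
      (fun d i => d.modify (PySem.List.pyGetD r i 0) [] (fun g => g ++ [i]))
      PySem.Dict.empty
    (PySem.List.pyRange 1 (N + 1) 1).foldl
      (fun total j =>
        let g := occ.getD (PySem.List.pyGetD r j 0) []
        total + ((bisectLeft g j : Int) - (bisectLeft g (max 0 (j - K + 1)) : Int)))
      0

-- ===== PRECONDITION & SPEC =====
-- Pre_solve excludes exactly the inputs where Python A raises: ZeroDivisionError (K = 0 with N ≥ 1)
-- and IndexError (N > len(A) with K ≠ 1, or K < 0 with N ≥ 2, where A's eviction index
-- max(0,(j-1)-K+1) runs past the prefix array S).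
def Pre_solve (N : Int) (K : Int) (A : List Int) : Prop :=
  K = 1 ∨ N ≤ 0 ∨ (2 ≤ K ∧ N ≤ (A.length : Int)) ∨ (N = 1 ∧ 1 ≤ (A.length : Int) ∧ K < 0)
instance (N : Int) (K : Int) (A : List Int) : Decidable (Pre_solve N K A) := by
  unfold Pre_solve; infer_instance

def pvWitness_solve : Int × Int × List Int := (3, 2, [1, 2, 3])

def Spec_solve (N : Int) (K : Int) (A : List Int) (out : Int) : Prop := out = solve_alt N K A
instance (N : Int) (K : Int) (A : List Int) (out : Int) : Decidable (Spec_solve N K A out) := by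
  unfold Spec_solve; infer_instance

-- ===== CLAIM (what is proved, stated in full; the proofs are below) =====
def Claim_equal_solve : Prop := ∀ (N : Int) (K : Int) (A : List Int),
  Dom_solve N K A → Pre_solve N K A → Spec_solve N K A (solve N K A)

-- ===== LEMMAS AND PROOFS =====

-- residue of prefix index i, read off the shared prefix array S
def pvRf (K : Int) (S : List Int) (i : Int) : Int :=
  PySem.Int.mod (PySem.List.pyGetD S i 0 - i) K
-- window of admissible i for a given j
def pvWin (K j : Int) : List Int := PySem.List.pyRange (max 0 (j - K + 1)) j 1
-- number of i in the window of j whose residue is m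
def pvW (K : Int) (S : List Int) (j m : Int) : Nat :=
  (pvWin K j).countP (fun i => pvRf K S i == m)
-- A's dict invariant: count holds exactly the nonzero window residue multiplicities
def pvInv (K : Int) (S : List Int) (j : Int) (d : PySem.Dict Int Int) : Prop :=
  ∀ m, d.get? m = if pvW K S j m = 0 then none else some ((pvW K S j m : Int))
-- the common specification value: Σ_{j=1..n} #{i in window(j) : r i = r j}
def pvSsum (K : Int) (S : List Int) (n : Int) : Int :=
  ((PySem.List.pyRange 1 (n + 1) 1).map (fun j => ((pvW K S j (pvRf K S j) : Int)))).sum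
-- the group of residue-m indices that B's occ loop builds
def pvOccG (K : Int) (S : List Int) (N m : Int) : List Int :=
  (PySem.List.pyRange 0 (N + 1) 1).filter (fun i => pvRf K S i == m)

theorem pv_find?_filter_ne (l : List (Int × Int)) (k k' : Int) :
    (l.filter (fun p => !(p.1 == k))).find? (fun p => p.1 == k')
      = if k' = k then none else l.find? (fun p => p.1 == k') := by
  induction l with
  | nil => simp
  | cons p t ih =>
    by_cases hk : p.1 = k
    · have hfc : (p :: t).filter (fun q => !(q.1 == k)) = t.filter (fun q => !(q.1 == k)) := by
        simp [hk]
      rw [hfc, ih]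
      by_cases hkk : k' = k
      · simp [hkk]
      · have h2 : (p.1 == k') = false := by
          simp only [beq_eq_false_iff_ne, ne_eq, hk]
          exact fun e => hkk e.symm
        rw [if_neg hkk, if_neg hkk, List.find?_cons]
        simp only [h2]
    · have hfc : (p :: t).filter (fun q => !(q.1 == k)) = p :: t.filter (fun q => !(q.1 == k)) := by
        simp [hk]
      rw [hfc]
      by_cases h3 : p.1 = k'
      · have hkk : ¬ k' = k := fun e => hk (by rw [h3, e])
        have hb : (p.1 == k') = true := by simp [h3]
        rw [if_neg hkk, List.find?_cons, List.find?_cons]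
        simp only [hb]
      · have hb : (p.1 == k') = false := by simp [h3]
        rw [List.find?_cons]
        simp only [hb]
        rw [ih]
        by_cases hkk : k' = k
        · simp [hkk]
        · rw [if_neg hkk, if_neg hkk, List.find?_cons]
          simp only [hb]

theorem pv_get?_erase (d : PySem.Dict Int Int) (k k' : Int) :
    (d.erase k).get? k' = if k' = k then none else d.get? k' := by
  cases d with
  | mk items =>
    show ((items.filter (fun p => !(p.1 == k))).find? (fun p => p.1 == k')).map (·.2)
        = if k' = k then none else (items.find? (fun p => p.1 == k')).map (·.2)
    rw [pv_find?_filter_ne]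
    by_cases hkk : k' = k <;> simp [hkk]

theorem pv_incr_get? (d : PySem.Dict Int Int) (c : Int → Nat) (x : Int)
    (h : ∀ m, d.get? m = if c m = 0 then none else some ((c m : Int))) (m : Int) :
    (dictIncr d x).get? m
      = if c m + (if x == m then 1 else 0) = 0 then none
        else some ((c m + (if x == m then 1 else 0) : Nat) : Int) := by
  have hx := h x
  unfold dictIncr
  by_cases hc : c x = 0
  · rw [if_pos hc] at hx
    simp only [hx]
    rw [PySem.Dict.get?_insert]
    by_cases hm : m = x
    · subst hm
      rw [if_pos rfl]
      simp [hc]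
    · rw [if_neg hm, h m]
      simp [Ne.symm hm]
  · rw [if_neg hc] at hx
    simp only [hx]
    rw [PySem.Dict.get?_insert]
    by_cases hm : m = x
    · subst hm
      rw [if_pos rfl]
      rw [if_neg (show ¬(c m + (if (m == m) = true then 1 else 0) = 0) by simp)]
      have hcast : ((c m : Int)) + 1 = ((c m + 1 : Nat) : Int) := by push_cast; ring
      rw [hcast]
      simp
    · rw [if_neg hm, h m]
      simp [Ne.symm hm]

theorem pv_decr_get? (d : PySem.Dict Int Int) (c : Int → Nat) (x : Int)
    (h : ∀ m, d.get? m = if c m = 0 then none else some ((c m : Int)))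
    (hx0 : c x ≠ 0) (m : Int) :
    (dictDecr d x).get? m
      = if c m - (if x == m then 1 else 0) = 0 then none
        else some ((c m - (if x == m then 1 else 0) : Nat) : Int) := by
  have hx := h x
  rw [if_neg hx0] at hx
  unfold dictDecr
  simp only [hx]
  by_cases h1 : c x = 1
  · rw [if_pos (show ((c x : Int)) = 1 by exact_mod_cast h1)]
    rw [pv_get?_erase]
    by_cases hm : m = x
    · subst hm
      simp [h1]
    · rw [if_neg hm, h m]
      simp [Ne.symm hm]
  · rw [if_neg (show ¬ ((c x : Int)) = 1 by exact_mod_cast h1)]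
    rw [PySem.Dict.get?_insert]
    by_cases hm : m = x
    · subst hm
      rw [if_pos rfl]
      rw [if_neg (show ¬(c m - (if (m == m) = true then 1 else 0) = 0) by simp; omega)]
      have hge : (1 : Nat) ≤ c m := by omega
      have hcast : ((c m : Int)) - 1 = ((c m - 1 : Nat) : Int) := by push_cast [hge]; ring
      rw [hcast]
      simp
    · rw [if_neg hm, h m]
      simp [Ne.symm hm]

theorem pv_step_inv (K : Int) (S : List Int) (hK : 2 ≤ K) (t : Int) (ht : 2 ≤ t)
    (cs : Int) (d : PySem.Dict Int Int) (hI : pvInv K S (t - 1) d) :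
    (solveStep K S (cs, d) t).1 = cs + (pvW K S t (pvRf K S t) : Int)
      ∧ pvInv K S t (solveStep K S (cs, d) t).2 := by
  have hlo : max 0 (t - 1 - K + 1) ≤ t - 1 - 1 := by omega
  have hwm1 : pvWin K (t - 1) = PySem.List.pyRange (max 0 (t - 1 - K + 1)) (t - 1) 1 := rfl
  -- the residue at index i, as the port spells it
  have hrf : ∀ i : Int, PySem.Int.mod (PySem.List.pyGetD S i 0 - i) K = pvRf K S i :=
    fun _ => rfl
  -- u m := count of residues m among indices in [max 0 (t-K+1), t-1)
  set u : Int → Nat :=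
    fun m => (PySem.List.pyRange (max 0 (t - K + 1)) (t - 1) 1).countP (fun i => pvRf K S i == m)
    with hu
  have hmid : ∀ m, ((if max 0 (t - K + 1) ≠ max 0 (t - 1 - K + 1) then
        dictDecr d (pvRf K S (max 0 (t - 1 - K + 1)))
      else d).get? m) = if u m = 0 then none else some ((u m : Int)) := by
    intro m
    by_cases hsh : max 0 (t - K + 1) ≠ max 0 (t - 1 - K + 1)
    · rw [if_pos hsh]
      have h1 : max 0 (t - 1 - K + 1) = t - K := by omega
      have h2 : max 0 (t - K + 1) = t - K + 1 := by omega
      have hcons : pvWin K (t - 1)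
          = (t - K) :: PySem.List.pyRange (t - K + 1) (t - 1) 1 := by
        rw [hwm1, h1, PySem.List.pyRange_one_cons (by omega)]
      have hWm : ∀ m', pvW K S (t - 1) m'
          = (if pvRf K S (t - K) == m' then 1 else 0) + u m' := by
        intro m'
        rw [pvW, hcons, List.countP_cons, hu]
        simp only [h2]
        omega
      have hx0 : pvW K S (t - 1) (pvRf K S (t - K)) ≠ 0 := by
        rw [hWm]; simp
      rw [h1]
      rw [pv_decr_get? d (pvW K S (t - 1)) (pvRf K S (t - K)) hI hx0 m]
      rw [hWm m]
      by_cases hb : (pvRf K S (t - K) == m) = true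
      · simp [hb]
      · simp [hb]
    · rw [if_neg hsh]
      rw [not_ne_iff] at hsh
      have hWu : pvW K S (t - 1) m = u m := by
        rw [pvW, hwm1, ← hsh]
      rw [hI m, hWu]
  -- the window at t is the window slice [max 0 (t-K+1), t-1) plus the new index t-1
  have hWt : ∀ m, pvW K S t m = u m + (if pvRf K S (t - 1) == m then 1 else 0) := by
    intro m
    have hsp : pvWin K t
        = PySem.List.pyRange (max 0 (t - K + 1)) (t - 1) 1 ++ [t - 1] := by
      rw [pvWin]
      have := PySem.List.pyRange_one_succ_right
        (a := max 0 (t - K + 1)) (b := t - 1) (by omega)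
      rw [show t - 1 + 1 = t by ring] at this
      exact this
    rw [pvW, hsp, List.countP_append, hu]
    simp [List.countP_cons]
  have hIt : pvInv K S t (dictIncr
      (if max 0 (t - K + 1) ≠ max 0 (t - 1 - K + 1) then
        dictDecr d (pvRf K S (max 0 (t - 1 - K + 1)))
      else d)
      (pvRf K S (t - 1))) := by
    intro m
    rw [pv_incr_get? _ u (pvRf K S (t - 1)) hmid m, hWt m]
  -- conclude: the query adds exactly pvW t (pvRf t)
  unfold solveStep
  rw [if_neg (show ¬ t = 1 by omega)]
  dsimp only
  simp only [hrf]
  have hq := hIt (pvRf K S t)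
  by_cases hz : pvW K S t (pvRf K S t) = 0
  · rw [if_pos hz] at hq
    simp only [hq]
    exact ⟨by simp [hz], hIt⟩
  · rw [if_neg hz] at hq
    simp only [hq]
    exact ⟨by simp, hIt⟩

theorem pv_base_inv (K : Int) (S : List Int) (hK : 2 ≤ K) :
    (solveStep K S (0, PySem.Dict.empty) 1).1 = pvW K S 1 (pvRf K S 1)
      ∧ pvInv K S 1 (solveStep K S (0, PySem.Dict.empty) 1).2 := by
  have hmax : max (0 : Int) (1 - K + 1) = 0 := by omega
  have hwin : PySem.List.pyRange (max (0 : Int) (1 - K + 1)) 1 1 = [0] := by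
    rw [hmax]
    have := PySem.List.pyRange_one_singleton (a := (0 : Int))
    simpa using this
  have hw1 : ∀ m, pvW K S 1 m = if pvRf K S 0 == m then 1 else 0 := by
    intro m
    rw [pvW, pvWin, hwin]
    simp [List.countP_cons]
  have hI1 : pvInv K S 1 (dictIncr PySem.Dict.empty (pvRf K S 0)) := by
    intro m
    unfold dictIncr
    rw [PySem.Dict.get?_empty]
    rw [PySem.Dict.get?_insert, hw1 m]
    by_cases hm : m = pvRf K S 0
    · subst hm
      simp
    · rw [if_neg hm]
      have hb : (pvRf K S 0 == m) = false := by simp [Ne.symm hm]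
      simp [hb, PySem.Dict.get?_empty]
  unfold solveStep
  rw [if_pos rfl, hwin]
  simp only [List.foldl_cons, List.foldl_nil]
  have hrf0 : PySem.Int.mod (PySem.List.pyGetD S 0 0 - 0) K = pvRf K S 0 := rfl
  have hrf1 : PySem.Int.mod (PySem.List.pyGetD S 1 0 - 1) K = pvRf K S 1 := rfl
  rw [hrf0, hrf1]
  have hq := hI1 (pvRf K S 1)
  by_cases hz : pvW K S 1 (pvRf K S 1) = 0
  · rw [if_pos hz] at hq
    simp only [hq]
    exact ⟨by simp [hz], hI1⟩
  · rw [if_neg hz] at hq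
    simp only [hq]
    exact ⟨by simp, hI1⟩

theorem pv_fold_inv (K : Int) (S : List Int) (hK : 2 ≤ K) (n : Nat) (hn : 1 ≤ n) :
    ((PySem.List.pyRange 1 ((n : Int) + 1) 1).foldl (solveStep K S) (0, PySem.Dict.empty)).1
        = pvSsum K S (n : Int)
      ∧ pvInv K S (n : Int)
        ((PySem.List.pyRange 1 ((n : Int) + 1) 1).foldl (solveStep K S) (0, PySem.Dict.empty)).2 := by
  induction n, hn using Nat.le_induction with
  | base =>
    have h2 : ((1 : Nat) : Int) + 1 = 2 := by norm_num
    have hrg : PySem.List.pyRange 1 (((1 : Nat) : Int) + 1) 1 = [1] := by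
      rw [h2]
      have := PySem.List.pyRange_one_singleton (a := (1 : Int))
      simpa using this
    rw [hrg]
    simp only [List.foldl_cons, List.foldl_nil]
    have hb := pv_base_inv K S hK
    refine ⟨?_, ?_⟩
    · rw [hb.1]
      rw [pvSsum]
      have : PySem.List.pyRange 1 (((1 : Nat) : Int) + 1) 1 = [1] := hrg
      rw [this]
      simp
    · exact hb.2
  | succ n hn ih =>
    have hsp : PySem.List.pyRange 1 (((n + 1 : Nat) : Int) + 1) 1
        = PySem.List.pyRange 1 ((n : Int) + 1) 1 ++ [(n : Int) + 1] := by
      have := PySem.List.pyRange_one_succ_right (a := (1 : Int)) (b := (n : Int) + 1)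
        (by exact_mod_cast by omega)
      push_cast
      push_cast at this
      exact this
    rw [hsp, List.foldl_append]
    simp only [List.foldl_cons, List.foldl_nil]
    set prev := (PySem.List.pyRange 1 ((n : Int) + 1) 1).foldl (solveStep K S)
      (0, PySem.Dict.empty) with hprev
    have hIprev : pvInv K S (((n : Int) + 1) - 1) prev.2 := by
      rw [show ((n : Int) + 1) - 1 = (n : Int) by ring]
      exact ih.2
    have hstep := pv_step_inv K S hK ((n : Int) + 1) (by omega) prev.1 prev.2 hIprev
    constructor
    · rw [hstep.1, ih.1]
      rw [pvSsum, pvSsum]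
      have hsp2 : PySem.List.pyRange 1 (((n + 1 : Nat) : Int) + 1) 1
          = PySem.List.pyRange 1 ((n : Int) + 1) 1 ++ [(n : Int) + 1] := hsp
      rw [hsp2, List.map_append, List.sum_append]
      simp
    · rw [show ((n + 1 : Nat) : Int) = (n : Int) + 1 by push_cast; ring]
      exact hstep.2

theorem pv_countP_cut (g : List Int) (v : Int) (lo : Nat) (hlen : lo ≤ g.length)
    (h1 : ∀ k, k < lo → ∀ hk : k < g.length, g[k] < v)
    (h2 : ∀ k, lo ≤ k → ∀ hk : k < g.length, ¬ g[k] < v) :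
    g.countP (fun x => x < v) = lo := by
  conv_lhs => rw [← List.take_append_drop lo g]
  rw [List.countP_append]
  have htake : (g.take lo).countP (fun x => decide (x < v)) = (g.take lo).length := by
    rw [List.countP_eq_length]
    intro a ha
    rw [List.mem_iff_getElem] at ha
    obtain ⟨k, hk, hak⟩ := ha
    have hk2 : k < lo ∧ k < g.length := by simpa using hk
    rw [List.getElem_take] at hak
    subst hak
    exact decide_eq_true (h1 k hk2.1 hk2.2)
  have hdrop : (g.drop lo).countP (fun x => decide (x < v)) = 0 := by
    rw [List.countP_eq_zero]
    intro a ha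
    rw [List.mem_iff_getElem] at ha
    obtain ⟨k, hk, hak⟩ := ha
    have hk2 : k < g.length - lo := by simpa using hk
    rw [List.getElem_drop] at hak
    subst hak
    simpa using h2 (lo + k) (by omega) (by omega)
  rw [htake, hdrop, List.length_take]
  omega

theorem pv_bisect_loop (g : List Int) (v : Int) (hs : g.Pairwise (· ≤ ·)) :
    ∀ (fu lo hi : Nat), hi - lo ≤ fu → lo ≤ hi → hi ≤ g.length →
      (∀ k, k < lo → ∀ hk : k < g.length, g[k] < v) →
      (∀ k, hi ≤ k → ∀ hk : k < g.length, ¬ g[k] < v) →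
      bisectGo g v fu lo hi = g.countP (fun x => x < v) := by
  have hmono : ∀ (p q : Nat) (hp : p < g.length) (hq : q < g.length), p ≤ q → g[p] ≤ g[q] := by
    intro p q hp hq hpq
    rcases Nat.lt_or_ge p q with h | h
    · exact (List.pairwise_iff_getElem.mp hs) p q hp hq h
    · have : p = q := by omega
      subst this
      exact le_refl _
  intro fu
  induction fu with
  | zero =>
    intro lo hi hfu hle hlen h1 h2
    have : lo = hi := by omega
    subst this
    show lo = _
    exact (pv_countP_cut g v lo hlen h1 h2).symm
  | succ fu ih =>
    intro lo hi hfu hle hlen h1 h2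
    show (if lo < hi then
        (let mid := (lo + hi) / 2;
         if PySem.List.pyGetD g ((mid : Nat) : Int) 0 < v then bisectGo g v fu (mid + 1) hi
         else bisectGo g v fu lo mid)
      else lo) = g.countP (fun x => x < v)
    by_cases hlt : lo < hi
    · rw [if_pos hlt]
      show (if PySem.List.pyGetD g ((((lo + hi) / 2 : Nat)) : Int) 0 < v then
          bisectGo g v fu ((lo + hi) / 2 + 1) hi else bisectGo g v fu lo ((lo + hi) / 2))
        = g.countP (fun x => x < v)
      have hmlt : (lo + hi) / 2 < hi := by omega
      have hmge : lo ≤ (lo + hi) / 2 := by omega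
      have hmlen : (lo + hi) / 2 < g.length := by omega
      have hget : PySem.List.pyGetD g (((lo + hi) / 2 : Nat) : Int) 0 = g[(lo + hi) / 2] := by
        rw [PySem.List.pyGetD_natCast]
        exact List.getD_eq_getElem g 0 hmlen
      rw [hget]
      by_cases hv : g[(lo + hi) / 2] < v
      · rw [if_pos hv]
        exact ih ((lo + hi) / 2 + 1) hi (by omega) (by omega) hlen
          (by
            intro k hk hkl
            rcases Nat.lt_or_ge k ((lo + hi) / 2) with h | h
            · exact lt_of_le_of_lt (hmono k _ hkl hmlen (by omega)) hv
            · have : k = (lo + hi) / 2 := by omega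
              subst this
              exact hv)
          h2
      · rw [if_neg hv]
        exact ih lo ((lo + hi) / 2) (by omega) (by omega) (by omega) h1
          (by
            intro k hk hkl hkv
            exact hv (lt_of_le_of_lt (hmono _ k hmlen hkl hk) hkv))
    · rw [if_neg hlt]
      have : lo = hi := by omega
      subst this
      exact (pv_countP_cut g v lo hlen h1 h2).symm

theorem pv_bisect_spec (g : List Int) (v : Int) (hs : g.Pairwise (· ≤ ·)) :
    bisectLeft g v = g.countP (fun x => x < v) := by
  rw [bisectLeft]
  exact pv_bisect_loop g v hs g.length 0 g.length (by omega) (by omega) (le_refl _)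
    (by intro k hk; omega) (by intro k hk hkl; omega)

theorem pv_occ_getD (K N : Int) (S : List Int) (m : Int) :
    ((PySem.List.pyRange 0 (N + 1) 1).foldl
        (fun d i => d.modify (pvRf K S i) [] (fun g => g ++ [i])) PySem.Dict.empty).getD m []
      = pvOccG K S N m := by
  have hmap := List.foldl_map (f := fun i : Int => (pvRf K S i, i))
    (g := fun (d : PySem.Dict Int (List Int)) (p : Int × Int) =>
      d.modify p.1 [] (fun g => g ++ [p.2]))
    (l := PySem.List.pyRange 0 (N + 1) 1) (init := PySem.Dict.empty)
  rw [← hmap]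
  rw [PySem.Dict.getD_foldl_modify_append]
  rw [List.filter_map, List.map_map]
  simp only [PySem.Dict.getD_empty]
  rw [pvOccG]
  simp [Function.comp_def]

theorem pv_occG_sorted (K N : Int) (S : List Int) (m : Int) :
    (pvOccG K S N m).Pairwise (· ≤ ·) := by
  exact ((PySem.List.pairwise_lt_pyRange_one (a := 0) (b := N + 1)).filter _).imp
    (fun h => le_of_lt h)

theorem pv_countP_lt (K N : Int) (S : List Int) (m v : Int) (h0 : 0 ≤ v) (hv : v ≤ N + 1) :
    (pvOccG K S N m).countP (fun x => x < v)
      = (PySem.List.pyRange 0 v 1).countP (fun i => pvRf K S i == m) := by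
  rw [pvOccG, List.countP_filter]
  rw [PySem.List.pyRange_one_append 0 v (N + 1) h0 hv, List.countP_append]
  have hup : (PySem.List.pyRange v (N + 1) 1).countP
      (fun a => decide (a < v) && (pvRf K S a == m)) = 0 := by
    rw [List.countP_eq_zero]
    intro a ha
    rw [PySem.List.mem_pyRange_one] at ha
    simp [show ¬ a < v by omega]
  rw [hup, Nat.add_zero]
  apply List.countP_congr
  intro a ha
  rw [PySem.List.mem_pyRange_one] at ha
  simp [show a < v by omega]

theorem pv_alt_eq_ssum (N K : Int) (A : List Int) (hK : 2 ≤ K) (hN : 1 ≤ N) :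
    solve_alt N K A = pvSsum K (buildS N A) N := by
  unfold solve_alt
  rw [if_neg (by omega)]
  set S := buildS N A with hS
  have hr : ∀ i : Int, 0 ≤ i → i < N + 1 →
      PySem.List.pyGetD ((PySem.List.pyRange 0 (N + 1) 1).map
        (fun i => PySem.Int.mod (PySem.List.pyGetD S i 0 - i) K)) i 0 = pvRf K S i := by
    intro i h0 h1
    rw [PySem.List.pyGetD_map_pyRange_of_nonneg _ _ _ _ h0 h1]
    rfl
  -- occ with the lookups replaced by pvRf
  have hocc : (PySem.List.pyRange 0 (N + 1) 1).foldl
      (fun d i => d.modify (PySem.List.pyGetD ((PySem.List.pyRange 0 (N + 1) 1).map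
        (fun i => PySem.Int.mod (PySem.List.pyGetD S i 0 - i) K)) i 0) [] (fun g => g ++ [i]))
      PySem.Dict.empty
      = (PySem.List.pyRange 0 (N + 1) 1).foldl
        (fun d i => d.modify (pvRf K S i) [] (fun g => g ++ [i])) PySem.Dict.empty := by
    apply PySem.List.foldl_congr_mem
    intro acc x hx
    rw [PySem.List.mem_pyRange_one] at hx
    rw [hr x hx.1 hx.2]
  refine Eq.trans (PySem.List.foldl_congr_mem _ _ (fun (total : Int) (j : Int) =>
    total + (((bisectLeft (pvOccG K S N (pvRf K S j)) j : Nat) : Int)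
      - ((bisectLeft (pvOccG K S N (pvRf K S j)) (max 0 (j - K + 1)) : Nat) : Int))) _
    (by
      intro acc j hj
      rw [PySem.List.mem_pyRange_one] at hj
      show acc + _ = acc + _
      rw [hr j (by omega) (by omega), hocc, pv_occ_getD])) ?_
  rw [PySem.List.foldl_add]
  rw [zero_add, pvSsum]
  apply congrArg
  apply List.map_congr_left
  intro j hj
  rw [PySem.List.mem_pyRange_one] at hj
  set m := pvRf K S j with hm
  have hs := pv_occG_sorted K N S m
  rw [pv_bisect_spec _ j hs, pv_bisect_spec _ (max 0 (j - K + 1)) hs]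
  rw [pv_countP_lt K N S m j (by omega) (by omega)]
  rw [pv_countP_lt K N S m (max 0 (j - K + 1)) (by omega) (by omega)]
  rw [PySem.List.pyRange_one_append 0 (max 0 (j - K + 1)) j (by omega) (by omega)]
  rw [List.countP_append]
  rw [pvW, pvWin]
  push_cast
  ring

theorem pv_a_eq_ssum (N K : Int) (A : List Int) (hK : 2 ≤ K) (hN : 1 ≤ N) :
    solve N K A = pvSsum K (buildS N A) N := by
  unfold solve
  rw [if_neg (by omega)]
  have hcast : ((N.toNat : Int)) = N := Int.toNat_of_nonneg (by omega)
  have := pv_fold_inv K (buildS N A) hK N.toNat (by omega)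
  rw [hcast] at this
  exact this.1

-- ===== VERDICT (by name: the statement is the Claim_ definition above) =====
theorem solve_spec : Claim_equal_solve := by
  intro N K A _hdom hpre
  show solve N K A = solve_alt N K A
  by_cases hK1 : K = 1
  · rw [solve, solve_alt, if_pos hK1, if_pos (by omega)]
  · by_cases hN0 : N ≤ 0
    · rw [solve, solve_alt, if_neg hK1, if_pos (Or.inr hN0)]
      rw [PySem.List.pyRange_one_eq_nil (by omega)]
      simp
    · rcases hpre with h | h | h | h
      · exact absurd h hK1
      · exact absurd h hN0
      · exact (pv_a_eq_ssum N K A h.1 (by omega)).trans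
          (pv_alt_eq_ssum N K A h.1 (by omega)).symm
      · -- N = 1, K < 0: both sides are 0
        obtain ⟨hN1, _hA, hKneg⟩ := h
        subst hN1
        rw [solve, solve_alt, if_neg hK1, if_pos (by omega)]
        have hrg : PySem.List.pyRange 1 (1 + 1) 1 = [1] := by
          have := PySem.List.pyRange_one_singleton (a := (1 : Int))
          simpa using this
        rw [hrg]
        simp only [List.foldl_cons, List.foldl_nil]
        unfold solveStep
        rw [if_pos rfl]
        rw [PySem.List.pyRange_one_eq_nil (by omega)]
        simp [PySem.Dict.get?_empty]
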